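-- pv_equiv track=rewrite | github.com/HAlejandro88/katas-python | min-max-sum.py | miniMaxSum
-- ===== SOURCE A (Python) =====
-- def miniMaxSum(arr):
--     # Write your code here
--     sums = []
--     aux = arr.copy()
--     for num in range(len(arr)):
--         aux = arr.copy()
--         aux.pop(num)
--         sums.append(sum(aux))
--
--     min_value = min(sums)
--     max_value = max(sums)
--
--     return [max_value, min_value]
-- ===== SOURCE B (Python) =====
-- def miniMaxSum(arr):
--     total = sum(arr)
--     return [total - min(arr), total - max(arr)]
-- ===== Notes on version B (the rewrite author's own statement) =====
-- stated objective: faster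
-- what changed: Replaces the quadratic loop that re-sums every leave-one-out copy (arr.copy()/pop per index, then min/max over the n sums) with a single pass: total = sum(arr), answer = [total - min(arr), total - max(arr)].
import Mathlib
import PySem

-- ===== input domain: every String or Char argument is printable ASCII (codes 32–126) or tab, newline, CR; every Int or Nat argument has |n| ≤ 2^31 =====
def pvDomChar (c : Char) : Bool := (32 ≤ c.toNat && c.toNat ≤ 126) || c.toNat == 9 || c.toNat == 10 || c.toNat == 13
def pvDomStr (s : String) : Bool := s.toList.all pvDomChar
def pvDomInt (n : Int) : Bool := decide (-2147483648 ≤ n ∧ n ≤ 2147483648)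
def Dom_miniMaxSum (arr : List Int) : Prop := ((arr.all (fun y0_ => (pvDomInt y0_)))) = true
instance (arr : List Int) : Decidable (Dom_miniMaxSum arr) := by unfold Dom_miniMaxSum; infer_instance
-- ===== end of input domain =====

-- B replaces A's quadratic re-summation of every leave-one-out copy with one pass: [sum - min, sum - max] (objective: faster, O(n^2) → O(n)).

-- ===== PORT A =====
-- for num in range(len(arr)): aux = arr.copy(); aux.pop(num); sums.append(sum(aux))
-- then return [max(sums), min(sums)]; pop never fails (num in range), the getD 0 only totalises it.
def miniMaxSum (arr : List Int) : List Int :=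
  let sums := (PySem.List.pyRange 0 (arr.length : Int) 1).foldl
    (fun sums num =>
      sums ++ [((PySem.List.pop? arr num).map (fun r => r.2.sum)).getD 0]) []
  match PySem.List.max? sums (fun x => x), PySem.List.min? sums (fun x => x) with
  | some mx, some mn => [mx, mn]
  | _, _ => []   -- Python raises ValueError here (empty list); excluded by Pre_

-- ===== PORT B =====
-- total = sum(arr); return [total - min(arr), total - max(arr)]
def miniMaxSum_alt (arr : List Int) : List Int :=
  let total := arr.sum
  match PySem.List.min? arr (fun x => x) with
  | none => []   -- Python raises ValueError here (empty list); excluded by Pre_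
  | some mn =>
    match PySem.List.max? arr (fun x => x) with
    | none => []
    | some mx => [total - mn, total - mx]

-- ===== PRECONDITION & SPEC =====
-- A calls min/max on the leave-one-out sums, which raises ValueError when arr is empty.
def Pre_miniMaxSum (arr : List Int) : Prop := arr ≠ []
instance (arr : List Int) : Decidable (Pre_miniMaxSum arr) := by unfold Pre_miniMaxSum; infer_instance
def pvWitness_miniMaxSum : List Int := [1, 2, 3]

def Spec_miniMaxSum (arr : List Int) (out : List Int) : Prop := out = miniMaxSum_alt arr
instance (arr : List Int) (out : List Int) : Decidable (Spec_miniMaxSum arr out) := by unfold Spec_miniMaxSum; infer_instance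

-- ===== CLAIM (what is proved, stated in full; the proofs are below) =====
def Claim_equal_miniMaxSum : Prop := ∀ (arr : List Int), Dom_miniMaxSum arr → Pre_miniMaxSum arr → Spec_miniMaxSum arr (miniMaxSum arr)

-- ===== LEMMAS AND PROOFS =====

-- the leave-one-out sum list, written index-free
lemma pv_loo_map : ∀ (arr : List Int) (c : Int),
    (List.range arr.length).map
      (fun (k : Nat) => ((PySem.List.pop? arr (k : Int)).map (fun r => c + r.2.sum)).getD 0)
      = arr.map (fun v => c + arr.sum - v) := by
  intro arr
  induction arr with
  | nil => intro c; simp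
  | cons x t ih =>
    intro c
    rw [List.length_cons, List.range_succ_eq_map, List.map_cons, List.map_map]
    have h0 : PySem.List.pop? (x :: t) ((0 : Nat) : Int) = some (x, t) := by
      simp [PySem.List.pop?_zero_cons x t]
    have htail : (List.range t.length).map
        ((fun (k : Nat) => ((PySem.List.pop? (x :: t) (k : Int)).map
            (fun r => c + r.2.sum)).getD 0) ∘ Nat.succ)
        = t.map (fun v => (c + x) + t.sum - v) := by
      rw [← ih (c + x)]
      apply List.map_congr_left
      intro k hk
      have hk' : k < t.length := List.mem_range.mp hk
      have h1 := PySem.List.pop?_natCast (x :: t) (k + 1)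
        (by simp [Nat.succ_lt_succ hk'])
      have h2 := PySem.List.pop?_natCast t k hk'
      simp only [Function.comp, Nat.succ_eq_add_one, h1, h2, Option.map_some,
        Option.getD_some, List.eraseIdx_cons_succ, List.sum_cons]
      ring
    rw [htail, h0]
    simp only [Option.map_some, Option.getD_some, List.sum_cons, List.map_cons]
    congr 1
    · ring
    · apply List.map_congr_left; intro v _; ring

-- folding max over (c - ·)-images computes c minus the folded min (and dually)
lemma pv_foldl_max_sub : ∀ (t : List Int) (c x : Int),
    (t.map (fun v => c - v)).foldl max (c - x) = c - t.foldl min x := by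
  intro t
  induction t with
  | nil => intro c x; simp
  | cons y t ih =>
    intro c x
    simp only [List.map_cons, List.foldl_cons]
    rw [show max (c - x) (c - y) = c - min x y by omega]
    exact ih c (min x y)

lemma pv_foldl_min_sub : ∀ (t : List Int) (c x : Int),
    (t.map (fun v => c - v)).foldl min (c - x) = c - t.foldl max x := by
  intro t
  induction t with
  | nil => intro c x; simp
  | cons y t ih =>
    intro c x
    simp only [List.map_cons, List.foldl_cons]
    rw [show min (c - x) (c - y) = c - max x y by omega]
    exact ih c (max x y)

-- ===== VERDICT (by name: the statement is the Claim_ definition above) =====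
theorem miniMaxSum_spec : Claim_equal_miniMaxSum := by
  intro arr _ hpre
  unfold Spec_miniMaxSum miniMaxSum miniMaxSum_alt
  obtain ⟨x, t, rfl⟩ := List.exists_cons_of_ne_nil hpre
  have hsums : (PySem.List.pyRange 0 ((x :: t).length : Int) 1).foldl
      (fun sums num =>
        sums ++ [((PySem.List.pop? (x :: t) num).map (fun r => r.2.sum)).getD 0]) []
      = (x :: t).map (fun v => 0 + (x :: t).sum - v) := by
    rw [PySem.List.foldl_append_singleton_eq_map, PySem.List.pyRange_one, List.map_map]
    rw [← pv_loo_map (x :: t) 0]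
    simp
  simp only [hsums]
  rw [List.map_cons]
  rw [PySem.List.max?_id_cons, PySem.List.min?_id_cons,
      PySem.List.min?_id_cons, PySem.List.max?_id_cons]
  have e : ∀ v : Int, 0 + (x :: t).sum - v = (x :: t).sum - v := by intro v; ring
  simp only [e]
  rw [pv_foldl_max_sub, pv_foldl_min_sub]
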